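-- pv_equiv track=rewrite | github.com/Profusion-AI/cardmint | src/ml/smolvlm_service.py | _parse_card_response
-- ===== SOURCE A (Python) =====
-- from typing import Dict, Any, Optional, List, Tuple, Union
--
-- def _parse_card_response(text: str) -> Dict[str, Any]:
--     """Parse SmolVLM response for card information."""
--     result = {
--         "card_name": None,
--         "card_set": None,
--         "card_number": None,
--         "raw_response": text
--     }
--
--     # Extract card name
--     if "Name:" in text:
--         name_start = text.find("Name:") + 5
--         name_end = text.find(",", name_start) if "," in text[name_start:] else len(text)
--         result["card_name"] = text[name_start:name_end].strip()
--     elif "Pokemon:" in text: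
--         name_start = text.find("Pokemon:") + 8
--         name_end = text.find(",", name_start) if "," in text[name_start:] else len(text)
--         result["card_name"] = text[name_start:name_end].strip()
--     else:
--         # Try to extract first capitalized word sequence
--         words = text.split()
--         for i, word in enumerate(words):
--             if word[0].isupper():
--                 result["card_name"] = word
--                 break
--
--     # Extract set
--     if "Set:" in text:
--         set_start = text.find("Set:") + 4
--         set_end = text.find(",", set_start) if "," in text[set_start:] else len(text)
--         result["card_set"] = text[set_start:set_end].strip()
--
--     # Extract number
--     if "Number:" in text:
--         num_start = text.find("Number:") + 7
--         num_end = text.find(",", num_start) if "," in text[num_start:] else len(text)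
--         result["card_number"] = text[num_start:num_end].strip()
--     elif "#" in text:
--         num_start = text.find("#") + 1
--         num_end = text.find(" ", num_start) if " " in text[num_start:] else len(text)
--         result["card_number"] = text[num_start:num_end].strip()
--
--     return result
-- ===== SOURCE B (Python) =====
-- def _parse_card_response(text: str) -> dict:
--     """Parse SmolVLM response for card information (single left-to-right scanner)."""
--
--     def scan(marker, stop):
--         # value after the first occurrence of marker, cut at the first stop char, stripped
--         for i in range(len(text)):
--             if text.startswith(marker, i):
--                 val = []
--                 for c in text[i + len(marker):]:
--                     if c == stop:
--                         break
--                     val.append(c)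
--                 return "".join(val).strip()
--         return None
--
--     words = [w for w in text.split() if w[0].isupper()]
--
--     name = scan("Name:", ",")
--     if name is None:
--         name = scan("Pokemon:", ",")
--     if name is None:
--         name = words[0] if words else None
--
--     number = scan("Number:", ",")
--     if number is None:
--         number = scan("#", " ")
--
--     return {
--         "card_name": name,
--         "card_set": scan("Set:", ","),
--         "card_number": number,
--         "raw_response": text,
--     }
-- ===== Notes on version B (the rewrite author's own statement) =====
-- stated objective: alternative
-- what changed: Replaces A's repeated find()/index-arithmetic/slice/conditional-endpoint extraction with one generic left-to-right scanner (startswith at each position, then an accumulate-until-stop-character loop) and a filtered word list for the capitalized-word fallback.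
import Mathlib
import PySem

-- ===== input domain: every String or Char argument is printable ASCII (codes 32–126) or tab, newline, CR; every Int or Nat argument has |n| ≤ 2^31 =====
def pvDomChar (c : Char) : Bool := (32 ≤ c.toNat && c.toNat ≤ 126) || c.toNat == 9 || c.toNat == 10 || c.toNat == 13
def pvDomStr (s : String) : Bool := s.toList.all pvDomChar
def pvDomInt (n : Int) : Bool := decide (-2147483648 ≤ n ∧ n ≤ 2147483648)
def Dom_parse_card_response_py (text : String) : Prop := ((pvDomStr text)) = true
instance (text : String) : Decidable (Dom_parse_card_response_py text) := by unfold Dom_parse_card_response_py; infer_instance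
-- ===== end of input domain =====

-- B replaces A's find/slice index arithmetic by a single left-to-right scanner (alternative decomposition; return value only).

-- ===== PORT A =====

-- the 'for i, word in enumerate(words): if word[0].isupper(): result["card_name"] = word; break' loop
-- (word[0] via pyGet?: split() never yields an empty word, so the 'none' branch is unreachable)
def pvFirstUpperLoop (ws : List (Int × String)) (result : PySem.Dict String (Option String)) :
    PySem.Dict String (Option String) :=
  match ws with
  | [] => result
  | (_, w) :: rest =>
      if (PySem.Str.pyGet? w 0).any PySem.Chars.isupper then result.insert "card_name" (some w)
      else pvFirstUpperLoop rest result

def parse_card_response_py (text : String) : List (String × Option String) :=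
  let result : PySem.Dict String (Option String) :=
    PySem.Dict.mk [("card_name", none), ("card_set", none), ("card_number", none), ("raw_response", some text)]
  let result :=
    if PySem.Str.isIn "Name:" text then
      let name_start : Int := PySem.Str.find text "Name:" + 5
      let name_end : Int :=
        if PySem.Str.isIn "," (PySem.Str.slice text (some name_start) none)
        then PySem.Str.findFrom text "," name_start else PySem.Str.len text
      result.insert "card_name" (some (PySem.Str.strip (PySem.Str.slice text (some name_start) (some name_end))))
    else if PySem.Str.isIn "Pokemon:" text then
      let name_start : Int := PySem.Str.find text "Pokemon:" + 8
      let name_end : Int :=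
        if PySem.Str.isIn "," (PySem.Str.slice text (some name_start) none)
        then PySem.Str.findFrom text "," name_start else PySem.Str.len text
      result.insert "card_name" (some (PySem.Str.strip (PySem.Str.slice text (some name_start) (some name_end))))
    else
      pvFirstUpperLoop (PySem.List.enumerate (PySem.Str.split₀ text)) result
  let result :=
    if PySem.Str.isIn "Set:" text then
      let set_start : Int := PySem.Str.find text "Set:" + 4
      let set_end : Int :=
        if PySem.Str.isIn "," (PySem.Str.slice text (some set_start) none)
        then PySem.Str.findFrom text "," set_start else PySem.Str.len text
      result.insert "card_set" (some (PySem.Str.strip (PySem.Str.slice text (some set_start) (some set_end))))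
    else result
  let result :=
    if PySem.Str.isIn "Number:" text then
      let num_start : Int := PySem.Str.find text "Number:" + 7
      let num_end : Int :=
        if PySem.Str.isIn "," (PySem.Str.slice text (some num_start) none)
        then PySem.Str.findFrom text "," num_start else PySem.Str.len text
      result.insert "card_number" (some (PySem.Str.strip (PySem.Str.slice text (some num_start) (some num_end))))
    else if PySem.Str.isIn "#" text then
      let num_start : Int := PySem.Str.find text "#" + 1
      let num_end : Int :=
        if PySem.Str.isIn " " (PySem.Str.slice text (some num_start) none)
        then PySem.Str.findFrom text " " num_start else PySem.Str.len text
      result.insert "card_number" (some (PySem.Str.strip (PySem.Str.slice text (some num_start) (some num_end))))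
    else result
  result.items

-- ===== PORT B =====

-- the inner 'for c in …: if c == stop: break; val.append(c)' loop of Source B's scan
def pvGrab (cs : List Char) (stop : Char) : List Char :=
  match cs with
  | [] => []
  | c :: rest => if c = stop then [] else c :: pvGrab rest stop

-- the outer 'for i in range(len(text)): if text.startswith(marker, i): …' loop of Source B's scan,
-- as the obvious recursion over suffixes (position i ↔ current suffix)
def pvScan (s marker : List Char) (stop : Char) : Option (List Char) :=
  match s with
  | [] => none
  | c :: rest =>
      if marker.isPrefixOf (c :: rest) then
        some (PySem.Chars.strip (pvGrab ((c :: rest).drop marker.length) stop))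
      else pvScan rest marker stop

def pvScanStr (text marker : String) (stop : Char) : Option String :=
  (pvScan text.toList marker.toList stop).map String.ofList

def parse_card_response_py_alt (text : String) : List (String × Option String) :=
  let words : List String :=
    (PySem.Str.split₀ text).filter (fun w => (PySem.Str.pyGet? w 0).any PySem.Chars.isupper)
  let name : Option String :=
    match pvScanStr text "Name:" ',' with
    | some v => some v
    | none =>
        match pvScanStr text "Pokemon:" ',' with
        | some v => some v
        | none => words.head?
  let number : Option String :=
    match pvScanStr text "Number:" ',' with
    | some v => some v
    | none => pvScanStr text "#" ' '
  [("card_name", name), ("card_set", pvScanStr text "Set:" ','),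
   ("card_number", number), ("raw_response", some text)]

-- ===== PRECONDITION & SPEC =====
def Spec_parse_card_response_py (text : String) (out : List (String × Option String)) : Prop := out = parse_card_response_py_alt text
instance (text : String) (out : List (String × Option String)) : Decidable (Spec_parse_card_response_py text out) := by unfold Spec_parse_card_response_py; infer_instance

-- ===== CLAIM (what is proved, stated in full; the proofs are below) =====
def Claim_equal_parse_card_response_py : Prop := ∀ (text : String), Dom_parse_card_response_py text → Spec_parse_card_response_py text (parse_card_response_py text)

-- ===== LEMMAS AND PROOFS =====

-- [a] is a prefix of l iff l starts with a
theorem pv_singleton_prefix (a : Char) (l : List Char) : [a] <+: l ↔ l[0]? = some a := by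
  cases l with
  | nil => simp
  | cons c t =>
      constructor
      · rintro ⟨s, hs⟩
        simp at hs
        simp [hs.1]
      · intro h; simp at h; exact ⟨t, by simp [h]⟩

-- find points at k when k is the first position where sub is a prefix
theorem pv_find_eq_of_first (cs sub : List Char) (k : Nat)
    (h1 : sub <+: cs.drop k) (h2 : ∀ j < k, ¬ sub <+: cs.drop j) :
    PySem.Chars.find cs sub = (k : Int) := by
  have hinf : PySem.Chars.isIn sub cs = true :=
    (PySem.Chars.exists_prefix_drop_iff_isIn sub cs).mp ⟨k, h1⟩
  have hnn : 0 ≤ PySem.Chars.find cs sub := by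
    rw [PySem.Chars.find_nonneg_iff]
    exact (PySem.Chars.isIn_iff_infix sub cs).mp hinf
  obtain ⟨hpre, hmin⟩ := PySem.Chars.find_spec hnn
  rcases Nat.lt_trichotomy (PySem.Chars.find cs sub).toNat k with h | h | h
  · exact absurd hpre (h2 _ h)
  · omega
  · exact absurd h1 (hmin _ h)

-- find on a cons when sub is not a prefix
theorem pv_find_cons (c : Char) (rest sub : List Char) (hnp : ¬ sub <+: c :: rest) :
    PySem.Chars.find (c :: rest) sub =
      (if PySem.Chars.find rest sub = -1 then -1 else PySem.Chars.find rest sub + 1) := by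
  split
  · next h =>
      rw [PySem.Chars.find_eq_neg_one_iff] at h ⊢
      rw [List.infix_cons_iff]
      rintro (h' | h') <;> [exact hnp h'; exact h h']
  · next h =>
      have hnn : 0 ≤ PySem.Chars.find rest sub := by
        have := PySem.Chars.neg_one_le_find (s := rest) (sub := sub); omega
      obtain ⟨hpre, hmin⟩ := PySem.Chars.find_spec hnn
      have : PySem.Chars.find (c :: rest) sub = (((PySem.Chars.find rest sub).toNat + 1 : Nat) : Int) := by
        apply pv_find_eq_of_first
        · simpa using hpre
        · intro j hj
          cases j with
          | zero => simpa using hnp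
          | succ j' => simpa using hmin j' (by omega)
      rw [this]; omega

-- characterization of B's scanner by A's find
theorem pv_scan_eq (cs m : List Char) (stop : Char) (hm : m ≠ []) :
    pvScan cs m stop =
      (if PySem.Chars.find cs m = -1 then none
       else some (PySem.Chars.strip (pvGrab (cs.drop ((PySem.Chars.find cs m).toNat + m.length)) stop))) := by
  induction cs with
  | nil =>
      rw [pvScan]
      have : PySem.Chars.find [] m = -1 := by
        rw [PySem.Chars.find_eq_neg_one_iff]; simpa [List.infix_nil] using hm
      simp [this]
  | cons c rest ih =>
      rw [pvScan]
      by_cases hp : m <+: c :: rest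
      · have hfind : PySem.Chars.find (c :: rest) m = (0 : Int) := by
          have := pv_find_eq_of_first (c :: rest) m 0 (by simpa using hp) (by omega)
          simpa using this
        rw [if_pos (List.isPrefixOf_iff_prefix.mpr hp), hfind]
        simp
      · rw [if_neg (by simpa [List.isPrefixOf_iff_prefix] using hp), ih, pv_find_cons c rest m hp]
        by_cases hr : PySem.Chars.find rest m = -1
        · simp [hr]
        · have hnn : 0 ≤ PySem.Chars.find rest m := by
            have := PySem.Chars.neg_one_le_find (s := rest) (sub := m); omega
          rw [if_neg hr, if_neg (by omega), if_neg (by omega)]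
          have : ((PySem.Chars.find rest m + 1).toNat + m.length) = ((PySem.Chars.find rest m).toNat + m.length) + 1 := by omega
          rw [this]
          simp [List.drop_succ_cons]

-- the inner loop keeps everything when stop does not occur
theorem pv_grab_of_not_mem (cs : List Char) (stop : Char) (h : stop ∉ cs) : pvGrab cs stop = cs := by
  induction cs with
  | nil => rfl
  | cons c rest ih =>
      rw [pvGrab]
      simp at h
      rw [if_neg (by tauto), ih (by tauto)]

-- the inner loop is take-to-the-first-occurrence
theorem pv_grab_eq_take (cs : List Char) (stop : Char) (j : Nat)
    (h1 : cs[j]? = some stop) (h2 : ∀ i < j, cs[i]? ≠ some stop) :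
    pvGrab cs stop = cs.take j := by
  induction cs generalizing j with
  | nil => simp at h1
  | cons c rest ih =>
      rw [pvGrab]
      by_cases hc : c = stop
      · have hj : j = 0 := by
          by_contra hne
          exact h2 0 (by omega) (by simp [hc])
        simp [hc, hj]
      · rw [if_neg hc]
        cases j with
        | zero => simp at h1; exact absurd h1 (by simpa [eq_comm] using hc)
        | succ j' =>
            rw [List.take_succ_cons, ih j' (by simpa using h1)
              (fun i hi => by simpa using h2 (i + 1) (by omega))]

-- A's inline slice/strip field expression equals B's scanner value, given the marker occurs
theorem pv_fieldA (cs m : List Char) (stop : Char)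
    (hin : PySem.Chars.isIn m cs = true) :
    PySem.Chars.strip (PySem.Chars.slice cs (some (PySem.Chars.find cs m + m.length))
      (some (if PySem.Chars.isIn [stop] (PySem.Chars.slice cs (some (PySem.Chars.find cs m + m.length)) none) = true
             then PySem.Chars.findFrom cs [stop] (PySem.Chars.find cs m + m.length)
             else PySem.Chars.len cs)))
    = PySem.Chars.strip (pvGrab (cs.drop ((PySem.Chars.find cs m).toNat + m.length)) stop) := by
  have hnn : 0 ≤ PySem.Chars.find cs m := by
    rw [PySem.Chars.find_nonneg_iff]
    exact (PySem.Chars.isIn_iff_infix m cs).mp hin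
  obtain ⟨hpre, -⟩ := PySem.Chars.find_spec hnn
  set a : Nat := (PySem.Chars.find cs m).toNat + m.length with ha
  have hcast : PySem.Chars.find cs m + (m.length : Int) = (a : Int) := by omega
  have hale : a ≤ cs.length := by
    have h1 := hpre.length_le
    simp only [List.length_drop] at h1
    have h2 := PySem.Chars.find_le_length cs m
    omega
  rw [hcast]
  have hslice_from : PySem.Chars.slice cs (some (a : Int)) none = cs.drop a := by
    simp [PySem.List.slice_from_natCast cs a]
  rw [hslice_from]
  set rest := cs.drop a with hrest
  by_cases hc : PySem.Chars.isIn [stop] rest = true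
  · rw [if_pos hc]
    have hnn2 : 0 ≤ PySem.Chars.find rest [stop] := by
      rw [PySem.Chars.find_nonneg_iff]; exact (PySem.Chars.isIn_iff_infix _ _).mp hc
    obtain ⟨hp2, hmin2⟩ := PySem.Chars.find_spec hnn2
    set j : Nat := (PySem.Chars.find rest [stop]).toNat with hj
    have hff : PySem.Chars.findFrom cs [stop] (a : Int) = ((a + j : Nat) : Int) := by
      rw [PySem.Chars.findFrom_natCast cs [stop] a hale, ← hrest, if_neg (by omega)]
      push_cast; omega
    rw [hff]
    have hsl : PySem.Chars.slice cs (some (a : Int)) (some ((a + j : Nat) : Int)) = rest.take j := by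
      have := PySem.List.slice_natCast cs a (a + j)
      simpa [hrest] using this
    rw [hsl]
    congr 1
    rw [pv_grab_eq_take rest stop j]
    · rw [pv_singleton_prefix] at hp2
      simpa using hp2
    · intro i hi
      have := hmin2 i hi
      rw [pv_singleton_prefix] at this
      simpa using this
  · rw [if_neg hc]
    have hlen : PySem.Chars.len cs = ((cs.length : Nat) : Int) := by simp
    rw [hlen]
    have hsl : PySem.Chars.slice cs (some (a : Int)) (some ((cs.length : Nat) : Int)) = rest := by
      rw [PySem.Chars.slice_eq_listSlice, PySem.List.slice_natCast cs a cs.length]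
      exact List.take_of_length_le (by simp)
    rw [hsl]
    congr 1
    rw [pv_grab_of_not_mem]
    intro hmem
    apply hc
    obtain ⟨t1, t2, h12⟩ := List.mem_iff_append.mp hmem
    exact (PySem.Chars.isIn_iff_infix _ _).mpr ⟨t1, t2, by simp [h12]⟩

-- the String-level field equation: A's in-place expression is B's scan, when the marker occurs
theorem pv_field (text marker stopS : String) (stop : Char) (k : Int)
    (hs : stopS.toList = [stop]) (hk : k = (marker.toList.length : Int)) (hm : marker.toList ≠ [])
    (hin : PySem.Str.isIn marker text = true) :
    some (PySem.Str.strip (PySem.Str.slice text (some (PySem.Str.find text marker + k))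
      (some (if PySem.Str.isIn stopS (PySem.Str.slice text (some (PySem.Str.find text marker + k)) none) = true
             then PySem.Str.findFrom text stopS (PySem.Str.find text marker + k)
             else PySem.Str.len text))))
    = pvScanStr text marker stop := by
  subst hk
  rw [pvScanStr, pv_scan_eq _ _ _ hm]
  have hfind : PySem.Chars.find text.toList marker.toList ≠ -1 := by
    rw [PySem.Chars.find_ne_neg_one_iff]
    exact (PySem.Chars.isIn_iff_infix _ _).mp (by simpa [PySem.Str.isIn] using hin)
  rw [if_neg hfind, Option.map_some]
  have := pv_fieldA text.toList marker.toList stop (by simpa [PySem.Str.isIn] using hin)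
  rw [show PySem.Chars.len text.toList = ((text.toList.length : Nat) : Int) from by simp] at this
  simp only [PySem.Str.strip, PySem.Str.slice, PySem.Str.find, PySem.Str.findFrom,
    PySem.Str.isIn, PySem.Str.len, hs, String.toList_ofList]
  rw [this]

-- when the marker does not occur, B's scan yields None
theorem pv_scanStr_none (text marker : String) (stop : Char) (hm : marker.toList ≠ [])
    (hni : PySem.Str.isIn marker text = false) :
    pvScanStr text marker stop = none := by
  rw [pvScanStr, pv_scan_eq _ _ _ hm, if_pos, Option.map_none]
  rw [PySem.Chars.find_eq_neg_one_iff]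
  exact (PySem.Chars.isIn_eq_false_iff _ _).mp (by simpa [PySem.Str.isIn] using hni)

-- A's fallback loop is: insert the head of the filtered word list, if any
theorem pv_firstUpper (ws : List String) (s : Int) (d : PySem.Dict String (Option String)) :
    pvFirstUpperLoop (PySem.List.enumerate ws s) d =
      match (ws.filter (fun w => (PySem.Str.pyGet? w 0).any PySem.Chars.isupper)).head? with
      | some w => d.insert "card_name" (some w)
      | none => d := by
  induction ws generalizing s with
  | nil => simp [pvFirstUpperLoop, PySem.List.enumerate_nil]
  | cons w rest ih =>
      rw [PySem.List.enumerate_cons, pvFirstUpperLoop]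
      simp only [PySem.Str.pyGet?, PySem.Chars.pyGet?_eq_listPyGet?]
      by_cases hw : (PySem.List.pyGet? w.toList 0).any PySem.Chars.isupper = true
      · rw [if_pos hw]
        simp [hw]
      · rw [if_neg hw, ih]
        simp [hw]

-- ===== VERDICT (by name: the statement is the Claim_ definition above) =====
theorem parse_card_response_py_spec : Claim_equal_parse_card_response_py := by
  intro text _
  unfold Spec_parse_card_response_py
  simp only [parse_card_response_py, parse_card_response_py_alt]
  by_cases h1 : PySem.Str.isIn "Name:" text = true
  all_goals by_cases h2 : PySem.Str.isIn "Pokemon:" text = true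
  all_goals by_cases h3 : PySem.Str.isIn "Set:" text = true
  all_goals by_cases h4 : PySem.Str.isIn "Number:" text = true
  all_goals by_cases h5 : PySem.Str.isIn "#" text = true
  all_goals (
    first
      | rw [← pv_field text "Name:" "," ',' 5 (by decide) (by decide) (by decide) h1]
      | rw [pv_scanStr_none text "Name:" ',' (by decide) (by simpa using h1)])
  all_goals (
    first
      | rw [← pv_field text "Pokemon:" "," ',' 8 (by decide) (by decide) (by decide) h2]
      | rw [pv_scanStr_none text "Pokemon:" ',' (by decide) (by simpa using h2)])
  all_goals (
    first
      | rw [← pv_field text "Set:" "," ',' 4 (by decide) (by decide) (by decide) h3]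
      | rw [pv_scanStr_none text "Set:" ',' (by decide) (by simpa using h3)])
  all_goals (
    first
      | rw [← pv_field text "Number:" "," ',' 7 (by decide) (by decide) (by decide) h4]
      | rw [pv_scanStr_none text "Number:" ',' (by decide) (by simpa using h4)])
  all_goals (
    first
      | rw [← pv_field text "#" " " ' ' 1 (by decide) (by decide) (by decide) h5]
      | rw [pv_scanStr_none text "#" ' ' (by decide) (by simpa using h5)])
  all_goals simp only [h1, h2, h3, h4, h5, if_true, if_false, Bool.false_eq_true]
  all_goals (try rw [pv_firstUpper])
  all_goals (try (cases hhead : ((PySem.Str.split₀ text).filter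
      (fun w => (PySem.Str.pyGet? w 0).any PySem.Chars.isupper)).head?))
  all_goals rfl
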